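-- pv_equiv track=rewrite | github.com/qudwn1114/Algorithm | Programmers/알고리즘 고득점 Kit/힙(Heap)/더 맵게.py | solution
-- ===== SOURCE A (Python) =====
-- import heapq
--
-- def solution(scoville, K):
--     answer = 0
--     heapq.heapify(scoville)
--
--     while scoville[0] < K:
--         answer += 1
--         a = heapq.heappop(scoville)
--         b = heapq.heappop(scoville)
--         heapq.heappush(scoville, a + b*2)
--         if len(scoville) == 1:
--             if scoville[0] < K:
--                 answer = -1
--             break
--     return answer
-- ===== SOURCE B (Python) =====
-- def _insort(xs, v):
--     # insert v into the sorted list xs at its sorted position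
--     i = 0
--     while i < len(xs) and xs[i] < v:
--         i += 1
--     xs.insert(i, v)
--
--
-- def solution(scoville, K):
--     answer = 0
--     scoville.sort()
--     while scoville[0] < K:
--         answer += 1
--         a = scoville.pop(0)
--         b = scoville.pop(0)
--         _insort(scoville, a + b * 2)
--         if len(scoville) == 1:
--             if scoville[0] < K:
--                 answer = -1
--             break
--     return answer
-- ===== Notes on version B (the rewrite author's own statement) =====
-- stated objective: alternative
-- what changed: Replaces the binary heap (heapq heapify/heappop/heappush) with a fully sorted list maintained in place: sort once, pop the two smallest from the front, and re-insert each merged value at its sorted position.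
import Mathlib
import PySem

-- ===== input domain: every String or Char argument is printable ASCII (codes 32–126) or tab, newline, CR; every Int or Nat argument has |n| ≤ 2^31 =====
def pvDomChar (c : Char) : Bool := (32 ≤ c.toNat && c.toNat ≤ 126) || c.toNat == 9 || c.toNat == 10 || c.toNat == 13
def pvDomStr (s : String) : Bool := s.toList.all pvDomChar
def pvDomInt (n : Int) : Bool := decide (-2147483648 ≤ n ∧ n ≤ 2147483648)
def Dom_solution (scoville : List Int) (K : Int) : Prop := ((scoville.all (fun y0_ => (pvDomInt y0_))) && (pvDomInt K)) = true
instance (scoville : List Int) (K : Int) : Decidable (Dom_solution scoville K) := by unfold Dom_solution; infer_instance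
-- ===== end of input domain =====

-- B replaces A's binary heap with a sorted list kept sorted in place (alternative data structure,
-- same outputs). Equivalence is about the RETURN value only: A leaves the argument heap-ordered,
-- B leaves it fully sorted (same elements).

-- ===== PORT A =====
-- heapq is ported at its contract level: a heap's slot 0 holds its minimum, heappop removes one
-- occurrence of the minimum (exact for A's return value, which depends only on the multiset),
-- heappush adds the element, heapify rearranges in place (multiset unchanged, so identity here).
def pvHeappop (h : List Int) : Option (Int × List Int) :=
  match h.min? with
  | none => none                 -- IndexError: pop from empty heap
  | some m => some (m, h.erase m)

def pvGoA (K : Int) : Nat → List Int → Int → Int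
  | 0, _, ans => ans
  | f + 1, h, ans =>
    match h.min? with
    | none => ans                -- scoville[0] raises IndexError (outside Pre_)
    | some m =>
      if m < K then
        match pvHeappop h with
        | none => ans
        | some (a, h1) =>
          match pvHeappop h1 with
          | none => ans          -- second heappop raises IndexError (outside Pre_)
          | some (b, h2) =>
            let h3 := h2 ++ [a + b * 2]
            if h3.length = 1 then (if h3.headD 0 < K then -1 else ans + 1)
            else pvGoA K f h3 (ans + 1)
      else ans

def solution (scoville : List Int) (K : Int) : Int :=
  pvGoA K scoville.length scoville 0

-- ===== PORT B =====
-- _insort: the while loop finds the first index whose element is ≥ v, xs.insert(i, v).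
def pvInsort (xs : List Int) (v : Int) : List Int :=
  xs.takeWhile (fun b => b < v) ++ v :: xs.dropWhile (fun b => b < v)

def pvGoB (K : Int) : Nat → List Int → Int → Int
  | 0, _, ans => ans
  | f + 1, l, ans =>
    match l with
    | [] => ans                  -- scoville[0] raises IndexError (outside Pre_)
    | x :: t =>
      if x < K then
        match t with
        | [] => ans              -- second pop(0) raises IndexError (outside Pre_)
        | b :: t2 =>
          let l3 := pvInsort t2 (x + b * 2)
          if l3.length = 1 then (if l3.headD 0 < K then -1 else ans + 1)
          else pvGoB K f l3 (ans + 1)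
      else ans

def solution_alt (scoville : List Int) (K : Int) : Int :=
  let s := PySem.List.sorted scoville (fun x => x) false
  pvGoB K s.length s 0

-- ===== PRECONDITION & SPEC =====
-- Pre_ excludes exactly the inputs where Python A raises IndexError: the empty list
-- (scoville[0]) and a one-element list whose element is < K (the second heappop).
def Pre_solution (scoville : List Int) (K : Int) : Prop :=
  scoville ≠ [] ∧ (scoville.length = 1 → K ≤ scoville.headD 0)
instance (scoville : List Int) (K : Int) : Decidable (Pre_solution scoville K) := by
  unfold Pre_solution; infer_instance

def pvWitness_solution : List Int × Int := ([1, 2, 3, 9, 10, 12], 7)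

def Spec_solution (scoville : List Int) (K : Int) (out : Int) : Prop := out = solution_alt scoville K
instance (scoville : List Int) (K : Int) (out : Int) : Decidable (Spec_solution scoville K out) := by unfold Spec_solution; infer_instance

-- ===== CLAIM (what is proved, stated in full; the proofs are below) =====
def Claim_equal_solution : Prop := ∀ (scoville : List Int) (K : Int), Dom_solution scoville K → Pre_solution scoville K → Spec_solution scoville K (solution scoville K)

-- ===== LEMMAS AND PROOFS =====

-- insort unfolding on a cons cell
theorem pvInsort_nil (v : Int) : pvInsort [] v = [v] := rfl

theorem pvInsort_cons (x : Int) (t : List Int) (v : Int) :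
    pvInsort (x :: t) v = if x < v then x :: pvInsort t v else v :: x :: t := by
  by_cases h : x < v <;> simp [pvInsort, List.takeWhile, List.dropWhile, h]

theorem pvInsort_perm (xs : List Int) (v : Int) : (pvInsort xs v).Perm (v :: xs) := by
  induction xs with
  | nil => simp [pvInsort_nil]
  | cons x t ih =>
    rw [pvInsort_cons]
    by_cases h : x < v
    · simp only [h, if_pos]
      exact (ih.cons x).trans (List.Perm.swap v x t)
    · simp [h]

theorem pvInsort_sorted (xs : List Int) (v : Int) (hs : xs.Pairwise (· ≤ ·)) :
    (pvInsort xs v).Pairwise (· ≤ ·) := by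
  induction xs with
  | nil => simp [pvInsort_nil]
  | cons x t ih =>
    rw [pvInsort_cons]
    rcases List.pairwise_cons.mp hs with ⟨hx, ht⟩
    by_cases h : x < v
    · simp only [h, if_pos]
      refine List.pairwise_cons.mpr ⟨?_, ih ht⟩
      intro y hy
      rcases List.mem_cons.mp (((pvInsort_perm t v).mem_iff).mp hy) with rfl | hy'
      · exact le_of_lt h
      · exact hx y hy'
    · simp only [h, if_neg, not_false_iff]
      refine List.pairwise_cons.mpr ⟨?_, hs⟩
      intro y hy
      rcases List.mem_cons.mp hy with rfl | hy'
      · exact not_lt.mp h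
      · exact le_trans (not_lt.mp h) (hx y hy')

theorem min?_of_perm_sorted (hA : List Int) (x : Int) (t : List Int)
    (hp : hA.Perm (x :: t)) (hs : (x :: t).Pairwise (· ≤ ·)) : hA.min? = some x := by
  rcases List.pairwise_cons.mp hs with ⟨hx, _⟩
  refine List.min?_eq_some_iff.mpr ⟨hp.mem_iff.mpr (List.mem_cons.mpr (Or.inl rfl)), ?_⟩
  intro y hy
  rcases List.mem_cons.mp (hp.mem_iff.mp hy) with rfl | hy'
  · exact le_refl _
  · exact hx y hy'

theorem pvGo_eq (K : Int) : ∀ (f : Nat) (hA hB : List Int) (ans : Int),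
    hB.Pairwise (· ≤ ·) → hA.Perm hB → pvGoA K f hA ans = pvGoB K f hB ans := by
  intro f
  induction f with
  | zero => intro hA hB ans _ _; rfl
  | succ f ih =>
    intro hA hB ans hs hp
    cases hB with
    | nil =>
      have hnil : hA = [] := hp.eq_nil
      subst hnil; rfl
    | cons x t =>
      have hmin : hA.min? = some x := min?_of_perm_sorted hA x t hp hs
      rw [pvGoA, pvGoB.eq_def, hmin]
      by_cases hxK : x < K
      · simp only [hxK, if_pos]
        have hp1 : (hA.erase x).Perm t := by
          have h := hp.erase x
          rwa [List.erase_cons_head] at h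
        simp only [pvHeappop, hmin]
        cases t with
        | nil =>
          have hnil : hA.erase x = [] := hp1.eq_nil
          simp [hnil]
        | cons b t2 =>
          have hst : (b :: t2).Pairwise (fun a b => a ≤ b) := (List.pairwise_cons.mp hs).2
          have hmin2 : (hA.erase x).min? = some b := min?_of_perm_sorted _ b t2 hp1 hst
          have hp2 : ((hA.erase x).erase b).Perm t2 := by
            have h := hp1.erase b
            rwa [List.erase_cons_head] at h
          simp only [hmin2]
          have hperm3 : (((hA.erase x).erase b) ++ [x + b * 2]).Perm (pvInsort t2 (x + b * 2)) :=
            (List.perm_append_singleton _ _).trans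
              ((hp2.cons _).trans (pvInsort_perm t2 _).symm)
          rw [hperm3.length_eq]
          by_cases h1 : (pvInsort t2 (x + b * 2)).length = 1
          · simp only [h1, if_pos]
            have ht2 : t2 = [] := by
              have hl := (pvInsort_perm t2 (x + b * 2)).length_eq
              simp only [List.length_cons] at hl
              have : t2.length = 0 := by omega
              exact List.length_eq_zero_iff.mp this
            subst ht2
            have he : (hA.erase x).erase b = [] := hp2.eq_nil
            rw [he]
            rfl
          · simp only [h1, if_neg, not_false_iff]
            exact ih _ _ _ (pvInsort_sorted t2 _ (List.pairwise_cons.mp hst).2) hperm3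
      · simp [hxK]

theorem sorted_self_sorted (l : List Int) :
    (PySem.List.sorted l (fun x => x) false).Pairwise (· ≤ ·) :=
  PySem.List.sorted_pairwise (xs := l) (key := fun x => x)

-- ===== VERDICT (by name: the statement is the Claim_ definition above) =====
theorem solution_spec : Claim_equal_solution := by
  intro scoville K _ _
  unfold Spec_solution solution solution_alt
  have hperm : scoville.Perm (PySem.List.sorted scoville (fun x => x) false) :=
    (PySem.List.sorted_perm ..).symm
  rw [hperm.length_eq]
  exact pvGo_eq K _ _ _ 0 (sorted_self_sorted scoville) hperm
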